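-- pv_equiv track=rewrite | github.com/Defelo/AdventOfCode | Python/2016/07.py | check
-- ===== SOURCE A (Python) =====
-- def check(ip):
--     supernet = []
--     hypernet = []
--     tmp = ""
--     c = 0
--     for x in ip:
--         k = tmp
--         tmp += x
--         if x == "[":
--             if k:
--                 [hypernet, supernet][not c].append(k)
--             c += 1
--             tmp = ""
--         elif x == "]":
--             if k:
--                 [hypernet, supernet][not c].append(k)
--             c -= 1
--             tmp = ""
--     if tmp:
--         [hypernet, supernet][not c].append(tmp)
--
--     for sup in supernet:
--         for i in range(len(sup) - 2):
--             if sup[i] != sup[i + 2] or sup[i] == sup[i + 1]: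
--                 continue
--             if any(sup[i + 1] + sup[i] + sup[i + 1] in hyp for hyp in hypernet):
--                 return True
--     return False
-- ===== SOURCE B (Python) =====
-- def check(ip):
--     # one pass: collect (depth, segment) pairs; classification deferred to the set builds
--     segs = []
--     d = 0
--     seg = ""
--     for x in ip:
--         if x == "[" or x == "]":
--             if seg:
--                 segs.append((d, seg))
--             seg = ""
--             d += 1 if x == "[" else -1
--         else:
--             seg += x
--     if seg:
--         segs.append((d, seg))
--
--     # index both sides once: supernet ABA signatures, hypernet BAB signatures
--     # mirrored at build time, then a set intersection test
--     s_sigs = {(a, b) for d, s in segs if d == 0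
--               for a, b, a2 in zip(s, s[1:], s[2:]) if a == a2 != b}
--     h_sigs = {(y, x) for d, s in segs if d != 0
--               for x, y, x2 in zip(s, s[1:], s[2:]) if x == x2}
--     return not s_sigs.isdisjoint(h_sigs)
-- ===== Notes on version B (the rewrite author's own statement) =====
-- stated objective: faster
-- what changed: Replaces A's two-list depth parse and its matching phase (for every ABA found in a supernet, rescan every hypernet string for the BAB substring) by a single list of (depth, segment) pairs and two signature sets -- supernet ABA pairs and mirrored hypernet BAB pairs, each built in one pass over the triples of each segment -- finishing with a set-disjointness test.
import Mathlib
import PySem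

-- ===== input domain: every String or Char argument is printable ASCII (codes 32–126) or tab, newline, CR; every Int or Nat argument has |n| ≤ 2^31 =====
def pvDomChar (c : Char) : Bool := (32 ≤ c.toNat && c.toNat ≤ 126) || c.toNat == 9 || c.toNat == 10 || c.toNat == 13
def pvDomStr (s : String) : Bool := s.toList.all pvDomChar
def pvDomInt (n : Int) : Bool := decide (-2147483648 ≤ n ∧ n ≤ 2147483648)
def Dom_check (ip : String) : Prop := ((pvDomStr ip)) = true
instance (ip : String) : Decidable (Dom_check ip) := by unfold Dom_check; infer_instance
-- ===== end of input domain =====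

-- B parses into one list of (depth, segment) pairs instead of A's two lists, builds the
-- supernet ABA-signature set and the mirrored hypernet BAB-signature set in one pass each,
-- and finishes with a set-disjointness test instead of A's per-ABA rescan of every hypernet
-- (measured faster in a timing run).

-- ===== PORT A =====
-- A's depth-counter parse into two lists; state = ((supernet, hypernet), (tmp, c))
def pvParseStep (st : (List (List Char) × List (List Char)) × (List Char × Int)) (x : Char) :
    (List (List Char) × List (List Char)) × (List Char × Int) :=
  let sup := st.1.1; let hyp := st.1.2; let tmp := st.2.1; let c := st.2.2
  let k := tmp
  let tmp' := tmp ++ [x]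
  if x = '[' then
    let sh := if k ≠ [] then (if c = 0 then (sup ++ [k], hyp) else (sup, hyp ++ [k])) else (sup, hyp)
    (sh, ([], c + 1))
  else if x = ']' then
    let sh := if k ≠ [] then (if c = 0 then (sup ++ [k], hyp) else (sup, hyp ++ [k])) else (sup, hyp)
    (sh, ([], c - 1))
  else
    ((sup, hyp), (tmp', c))

def pvParse (cs : List Char) : List (List Char) × List (List Char) :=
  let st := cs.foldl pvParseStep (([], []), ([], 0))
  let sup := st.1.1; let hyp := st.1.2; let tmp := st.2.1; let c := st.2.2
  if tmp ≠ [] then (if c = 0 then (sup ++ [tmp], hyp) else (sup, hyp ++ [tmp])) else (sup, hyp)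

def check (ip : String) : Bool :=
  let p := pvParse ip.toList
  let supernet := p.1
  let hypernet := p.2
  supernet.any fun sup =>
    (List.range (sup.length - 2)).any fun i =>
      if sup.getD i ' ' ≠ sup.getD (i + 2) ' ' ∨ sup.getD i ' ' = sup.getD (i + 1) ' ' then
        false
      else
        hypernet.any fun hyp =>
          PySem.Chars.isIn [sup.getD (i + 1) ' ', sup.getD i ' ', sup.getD (i + 1) ' '] hyp

-- ===== PORT B =====
-- B's parse into ONE list of (depth, segment) pairs; state = (segs, (d, seg))
def pvSegsStep (st : List (Int × List Char) × (Int × List Char)) (x : Char) :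
    List (Int × List Char) × (Int × List Char) :=
  if x = '[' ∨ x = ']' then
    ((if st.2.2 ≠ [] then st.1 ++ [(st.2.1, st.2.2)] else st.1),
      ((if x = '[' then st.2.1 + 1 else st.2.1 - 1), []))
  else
    (st.1, (st.2.1, st.2.2 ++ [x]))

def pvSegs (cs : List Char) : List (Int × List Char) :=
  let st := cs.foldl pvSegsStep ([], (0, []))
  if st.2.2 ≠ [] then st.1 ++ [(st.2.1, st.2.2)] else st.1

-- zip(s, s[1:], s[2:]) : the overlapping character triples of a segment
def pvTrip (s : List Char) : List ((Char × Char) × Char) :=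
  (s.zip (s.drop 1)).zip (s.drop 2)

-- supernet ABA signatures (a, b) with a == a2 != b
def pvSSigs (segs : List (Int × List Char)) : PySem.Set (Char × Char) :=
  segs.foldl (fun acc p =>
    if p.1 = 0 then
      (pvTrip p.2).foldl (fun acc t =>
        if t.1.1 = t.2 ∧ t.2 ≠ t.1.2 then PySem.Set.add acc (t.1.1, t.1.2) else acc) acc
    else acc) PySem.Set.empty

-- hypernet BAB signatures, mirrored at build time: (y, x) with x == x2
def pvHSigs (segs : List (Int × List Char)) : PySem.Set (Char × Char) :=
  segs.foldl (fun acc p =>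
    if p.1 ≠ 0 then
      (pvTrip p.2).foldl (fun acc t =>
        if t.1.1 = t.2 then PySem.Set.add acc (t.1.2, t.1.1) else acc) acc
    else acc) PySem.Set.empty

def check_alt (ip : String) : Bool :=
  let segs := pvSegs ip.toList
  let sSigs := pvSSigs segs
  let hSigs := pvHSigs segs
  -- not s_sigs.isdisjoint(h_sigs)
  ! (PySem.Set.isdisjoint sSigs hSigs)

-- ===== PRECONDITION & SPEC =====
def Spec_check (ip : String) (out : Bool) : Prop := out = check_alt ip
instance (ip : String) (out : Bool) : Decidable (Spec_check ip out) := by unfold Spec_check; infer_instance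

-- ===== CLAIM (what is proved, stated in full; the proofs are below) =====
def Claim_equal_check : Prop := ∀ (ip : String), Dom_check ip → Spec_check ip (check ip)

-- ===== LEMMAS AND PROOFS =====

-- projections relating B's single tagged list to A's two lists
def pvSup (segs : List (Int × List Char)) : List (List Char) :=
  segs.filterMap (fun p => if p.1 = 0 then some p.2 else none)
def pvHyp (segs : List (Int × List Char)) : List (List Char) :=
  segs.filterMap (fun p => if p.1 = 0 then none else some p.2)

theorem step_eq (segs : List (Int × List Char)) (tmp : List Char) (c : Int) (x : Char) :
    pvParseStep ((pvSup segs, pvHyp segs), (tmp, c)) x =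
      ((pvSup (pvSegsStep (segs, (c, tmp)) x).1, pvHyp (pvSegsStep (segs, (c, tmp)) x).1),
        ((pvSegsStep (segs, (c, tmp)) x).2.2, (pvSegsStep (segs, (c, tmp)) x).2.1)) := by
  by_cases h1 : x = '['
  · by_cases h2 : tmp = [] <;> by_cases h3 : c = 0 <;>
      simp [pvParseStep, pvSegsStep, h1, h2, h3, pvSup, pvHyp, List.filterMap_append]
  · by_cases h1' : x = ']'
    · by_cases h2 : tmp = [] <;> by_cases h3 : c = 0 <;>
        simp [pvParseStep, pvSegsStep, h1', h2, h3, pvSup, pvHyp, List.filterMap_append]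
    · simp [pvParseStep, pvSegsStep, h1, h1']

theorem parse_fold_eq (cs : List Char) (segs : List (Int × List Char)) (tmp : List Char) (c : Int) :
    cs.foldl pvParseStep ((pvSup segs, pvHyp segs), (tmp, c)) =
      ((pvSup (cs.foldl pvSegsStep (segs, (c, tmp))).1,
        pvHyp (cs.foldl pvSegsStep (segs, (c, tmp))).1),
        ((cs.foldl pvSegsStep (segs, (c, tmp))).2.2,
          (cs.foldl pvSegsStep (segs, (c, tmp))).2.1)) := by
  induction cs generalizing segs tmp c with
  | nil => rfl
  | cons x cs ih =>
    simp only [List.foldl_cons, step_eq]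
    exact ih (pvSegsStep (segs, (c, tmp)) x).1 (pvSegsStep (segs, (c, tmp)) x).2.2
      (pvSegsStep (segs, (c, tmp)) x).2.1

theorem parse_eq (cs : List Char) : pvParse cs = (pvSup (pvSegs cs), pvHyp (pvSegs cs)) := by
  have h0 : (pvSup [], pvHyp []) = (([] : List (List Char)), ([] : List (List Char))) := rfl
  unfold pvParse pvSegs
  rw [← h0, parse_fold_eq cs [] [] 0]
  by_cases h2 : (cs.foldl pvSegsStep ([], (0, []))).2.2 = [] <;>
    by_cases h3 : (cs.foldl pvSegsStep ([], (0, []))).2.1 = 0 <;>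
      simp [h2, h3, pvSup, pvHyp, List.filterMap_append]

theorem mem_foldl_cond_add {α β : Type} [BEq β] [LawfulBEq β]
    (l : List α) (cond : α → Prop) [DecidablePred cond] (f : α → β) (acc : PySem.Set β) (x : β) :
    x ∈ l.foldl (fun acc t => if cond t then PySem.Set.add acc (f t) else acc) acc ↔
      x ∈ acc ∨ ∃ t ∈ l, cond t ∧ f t = x := by
  induction l generalizing acc with
  | nil => simp
  | cons a l ih =>
    simp only [List.foldl_cons, List.mem_cons]
    by_cases h : cond a
    · simp only [h, if_true, ih, PySem.Set.mem_add]
      constructor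
      · rintro ((hx | hx) | ⟨t, ht, hc, hf⟩)
        · exact Or.inl hx
        · exact Or.inr ⟨a, Or.inl rfl, h, hx.symm⟩
        · exact Or.inr ⟨t, Or.inr ht, hc, hf⟩
      · rintro (hx | ⟨t, (rfl | ht), hc, hf⟩)
        · exact Or.inl (Or.inl hx)
        · exact Or.inl (Or.inr hf.symm)
        · exact Or.inr ⟨t, ht, hc, hf⟩
    · simp only [h, if_false, ih]
      constructor
      · rintro (hx | ⟨t, ht, hc, hf⟩)
        · exact Or.inl hx
        · exact Or.inr ⟨t, Or.inr ht, hc, hf⟩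
      · rintro (hx | ⟨t, (rfl | ht), hc, hf⟩)
        · exact Or.inl hx
        · exact absurd hc h
        · exact Or.inr ⟨t, ht, hc, hf⟩

theorem mem_sigs_fold (segs : List (Int × List Char)) (P : Int × List Char → Prop)
    [DecidablePred P] (cond : (Char × Char) × Char → Prop) [DecidablePred cond]
    (f : (Char × Char) × Char → Char × Char) (acc : PySem.Set (Char × Char)) (x : Char × Char) :
    x ∈ segs.foldl
        (fun acc p => if P p then (pvTrip p.2).foldl
          (fun acc t => if cond t then PySem.Set.add acc (f t) else acc) acc else acc)
        acc ↔
      x ∈ acc ∨ ∃ p ∈ segs, P p ∧ ∃ t ∈ pvTrip p.2, cond t ∧ f t = x := by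
  induction segs generalizing acc with
  | nil => simp
  | cons p segs ih =>
    simp only [List.foldl_cons, List.mem_cons]
    by_cases hP : P p
    · simp only [hP, if_true, ih, mem_foldl_cond_add (pvTrip p.2) cond f acc x]
      constructor
      · rintro ((hx | ⟨t, ht, hc, hf⟩) | ⟨u, hu, hPu, t, ht, hc, hf⟩)
        · exact Or.inl hx
        · exact Or.inr ⟨p, Or.inl rfl, hP, t, ht, hc, hf⟩
        · exact Or.inr ⟨u, Or.inr hu, hPu, t, ht, hc, hf⟩
      · rintro (hx | ⟨u, (rfl | hu), hPu, t, ht, hc, hf⟩)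
        · exact Or.inl (Or.inl hx)
        · exact Or.inl (Or.inr ⟨t, ht, hc, hf⟩)
        · exact Or.inr ⟨u, hu, hPu, t, ht, hc, hf⟩
    · simp only [hP, if_false, ih]
      constructor
      · rintro (hx | ⟨u, hu, hPu, rest⟩)
        · exact Or.inl hx
        · exact Or.inr ⟨u, Or.inr hu, hPu, rest⟩
      · rintro (hx | ⟨u, (rfl | hu), hPu, rest⟩)
        · exact Or.inl hx
        · exact absurd hPu hP
        · exact Or.inr ⟨u, hu, hPu, rest⟩

theorem length_pvTrip (s : List Char) : (pvTrip s).length = s.length - 2 := by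
  simp [pvTrip]; omega

theorem getElem_pvTrip (s : List Char) (i : Nat) (h : i < (pvTrip s).length) :
    (pvTrip s)[i] =
      ((s[i]'(by simp [length_pvTrip] at h; omega),
        s[i+1]'(by simp [length_pvTrip] at h; omega)),
        s[i+2]'(by simp [length_pvTrip] at h; omega)) := by
  have h' := h
  simp only [length_pvTrip] at h'
  simp [pvTrip, List.getElem_zip, List.getElem_drop, Nat.add_comm]

theorem mem_pvTrip (s : List Char) (a b c : Char) :
    ((a, b), c) ∈ pvTrip s ↔
      ∃ i, ∃ h : i + 2 < s.length,
        s[i]'(by omega) = a ∧ s[i+1]'(by omega) = b ∧ s[i+2] = c := by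
  rw [List.mem_iff_getElem]
  constructor
  · rintro ⟨i, hi, he⟩
    rw [getElem_pvTrip s i hi] at he
    have hl : i + 2 < s.length := by simp [length_pvTrip] at hi; omega
    injection he with h1 h2
    injection h1 with ha hb
    exact ⟨i, hl, ha, hb, h2⟩
  · rintro ⟨i, hl, ha, hb, hc⟩
    have hi : i < (pvTrip s).length := by simp [length_pvTrip]; omega
    exact ⟨i, hi, by rw [getElem_pvTrip s i hi, ha, hb, hc]⟩

theorem mem_pvSSigs (segs : List (Int × List Char)) (a b : Char) :
    (a, b) ∈ pvSSigs segs ↔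
      (∃ p ∈ segs, p.1 = 0 ∧ ((a, b), a) ∈ pvTrip p.2) ∧ a ≠ b := by
  unfold pvSSigs
  rw [mem_sigs_fold segs (fun p => p.1 = 0) (fun t => t.1.1 = t.2 ∧ t.2 ≠ t.1.2)
    (fun t => (t.1.1, t.1.2)) PySem.Set.empty (a, b)]
  simp only [PySem.Set.empty, List.not_mem_nil, false_or]
  constructor
  · rintro ⟨p, hp, hP, ⟨⟨t11, t12⟩, t2⟩, ht, ⟨hc1, hc2⟩, hf⟩
    dsimp only at hc1 hc2 hf
    injection hf with hf1 hf2
    subst hf1; subst hf2; subst hc1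
    exact ⟨⟨p, hp, hP, ht⟩, hc2⟩
  · rintro ⟨⟨p, hp, hP, ht⟩, hne⟩
    exact ⟨p, hp, hP, ((a, b), a), ht, ⟨rfl, hne⟩, rfl⟩

theorem mem_pvHSigs (segs : List (Int × List Char)) (a b : Char) :
    (a, b) ∈ pvHSigs segs ↔ ∃ p ∈ segs, p.1 ≠ 0 ∧ ((b, a), b) ∈ pvTrip p.2 := by
  unfold pvHSigs
  rw [mem_sigs_fold segs (fun p => p.1 ≠ 0) (fun t => t.1.1 = t.2)
    (fun t => (t.1.2, t.1.1)) PySem.Set.empty (a, b)]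
  simp only [PySem.Set.empty, List.not_mem_nil, false_or]
  constructor
  · rintro ⟨p, hp, hP, ⟨⟨t11, t12⟩, t2⟩, ht, hc, hf⟩
    dsimp only at hc hf
    injection hf with hf1 hf2
    subst hf1; subst hf2; subst hc
    exact ⟨p, hp, hP, ht⟩
  · rintro ⟨p, hp, hP, ht⟩
    exact ⟨p, hp, hP, ((b, a), b), ht, rfl, rfl⟩

theorem prefix3_iff (x y z : Char) (t : List Char) :
    [x, y, z] <+: t ↔ ∃ h : 2 < t.length, t[0] = x ∧ t[1] = y ∧ t[2] = z := by
  match t with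
  | [] => simp
  | [a] => simp [List.cons_prefix_cons]
  | [a, b] => simp [List.cons_prefix_cons]
  | a :: b :: c :: rest =>
    simp [List.cons_prefix_cons, List.nil_prefix]
    constructor
    · rintro ⟨rfl, rfl, rfl⟩; exact ⟨rfl, rfl, rfl⟩
    · rintro ⟨rfl, rfl, rfl⟩; exact ⟨rfl, rfl, rfl⟩

theorem isIn3_iff (x y z : Char) (h : List Char) :
    PySem.Chars.isIn [x, y, z] h = true ↔
      ∃ j, ∃ hj : j + 2 < h.length,
        h[j]'(by omega) = x ∧ h[j+1]'(by omega) = y ∧ h[j+2] = z := by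
  rw [← PySem.Chars.exists_prefix_drop_iff_isIn]
  constructor
  · rintro ⟨j, hp⟩
    rw [prefix3_iff] at hp
    rcases hp with ⟨hl, h0, h1, h2⟩
    have hj : j + 2 < h.length := by simp at hl; omega
    simp only [List.getElem_drop] at h0 h1 h2
    exact ⟨j, hj, h0, h1, h2⟩
  · rintro ⟨j, hj, h0, h1, h2⟩
    refine ⟨j, ?_⟩
    rw [prefix3_iff]
    have hl : 2 < (h.drop j).length := by simp; omega
    refine ⟨hl, ?_, ?_, ?_⟩ <;> simp only [List.getElem_drop]
    · exact h0
    · exact h1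
    · exact h2

theorem A_search_iff (sup hyp : List (List Char)) :
    (sup.any fun s =>
      (List.range (s.length - 2)).any fun i =>
        if s.getD i ' ' ≠ s.getD (i + 2) ' ' ∨ s.getD i ' ' = s.getD (i + 1) ' ' then false
        else hyp.any fun t =>
          PySem.Chars.isIn [s.getD (i + 1) ' ', s.getD i ' ', s.getD (i + 1) ' '] t) = true ↔
    ∃ s ∈ sup, ∃ i, ∃ h : i + 2 < s.length,
      s[i]'(by omega) = s[i+2] ∧ s[i]'(by omega) ≠ s[i+1]'(by omega) ∧
      ∃ t ∈ hyp, PySem.Chars.isIn [s[i+1]'(by omega), s[i]'(by omega), s[i+1]'(by omega)] t = true := by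
  simp only [List.any_eq_true, List.mem_range]
  constructor
  · rintro ⟨s, hs, i, hi, hb⟩
    have hl : i + 2 < s.length := by omega
    rw [List.getD_eq_getElem s ' ' (show i < s.length by omega),
        List.getD_eq_getElem s ' ' (show i + 1 < s.length by omega),
        List.getD_eq_getElem s ' ' hl] at hb
    split at hb
    · exact absurd hb (by simp)
    · rename_i hcond
      push Not at hcond
      rw [List.any_eq_true] at hb
      exact ⟨s, hs, i, hl, hcond.1, hcond.2, hb⟩
  · rintro ⟨s, hs, i, hl, he, hne, t, ht, hin⟩
    refine ⟨s, hs, i, by omega, ?_⟩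
    rw [List.getD_eq_getElem s ' ' (show i < s.length by omega),
        List.getD_eq_getElem s ' ' (show i + 1 < s.length by omega),
        List.getD_eq_getElem s ' ' hl]
    rw [if_neg (by push Not; exact ⟨he, hne⟩), List.any_eq_true]
    exact ⟨t, ht, hin⟩

theorem mem_pvSup (segs : List (Int × List Char)) (s : List Char) :
    s ∈ pvSup segs ↔ ∃ p ∈ segs, p.1 = 0 ∧ p.2 = s := by
  simp only [pvSup, List.mem_filterMap]
  constructor
  · rintro ⟨p, hp, he⟩
    by_cases h : p.1 = 0
    · rw [if_pos h] at he; exact ⟨p, hp, h, Option.some_injective _ he⟩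
    · rw [if_neg h] at he; exact absurd he (by simp)
  · rintro ⟨p, hp, h0, rfl⟩
    exact ⟨p, hp, by rw [if_pos h0]⟩

theorem mem_pvHyp (segs : List (Int × List Char)) (s : List Char) :
    s ∈ pvHyp segs ↔ ∃ p ∈ segs, p.1 ≠ 0 ∧ p.2 = s := by
  simp only [pvHyp, List.mem_filterMap]
  constructor
  · rintro ⟨p, hp, he⟩
    by_cases h : p.1 = 0
    · rw [if_pos h] at he; exact absurd he (by simp)
    · rw [if_neg h] at he; exact ⟨p, hp, h, Option.some_injective _ he⟩
  · rintro ⟨p, hp, h0, rfl⟩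
    exact ⟨p, hp, by rw [if_neg h0]⟩

theorem B_search_iff (segs : List (Int × List Char)) :
    (! (PySem.Set.isdisjoint (pvSSigs segs) (pvHSigs segs))) = true ↔
    ∃ a b : Char, (a, b) ∈ pvSSigs segs ∧ (a, b) ∈ pvHSigs segs := by
  simp only [PySem.Set.isdisjoint, Bool.not_not, List.any_eq_true]
  constructor
  · rintro ⟨⟨a, b⟩, hab, hc⟩
    rw [PySem.Set.contains_iff] at hc
    exact ⟨a, b, hab, hc⟩
  · rintro ⟨a, b, hab, hba⟩
    exact ⟨(a, b), hab, by rw [PySem.Set.contains_iff]; exact hba⟩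

theorem search_eq (segs : List (Int × List Char)) :
    ((pvSup segs).any fun s =>
      (List.range (s.length - 2)).any fun i =>
        if s.getD i ' ' ≠ s.getD (i + 2) ' ' ∨ s.getD i ' ' = s.getD (i + 1) ' ' then false
        else (pvHyp segs).any fun t =>
          PySem.Chars.isIn [s.getD (i + 1) ' ', s.getD i ' ', s.getD (i + 1) ' '] t) =
    (! (PySem.Set.isdisjoint (pvSSigs segs) (pvHSigs segs))) := by
  rw [Bool.eq_iff_iff, A_search_iff, B_search_iff]
  constructor
  · rintro ⟨s, hs, i, hl, he, hne, t, ht, hin⟩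
    rw [mem_pvSup] at hs
    rcases hs with ⟨p, hp, h0, rfl⟩
    rw [mem_pvHyp] at ht
    rcases ht with ⟨q, hq, hq0, rfl⟩
    refine ⟨p.2[i]'(by omega), p.2[i+1]'(by omega), ?_, ?_⟩
    · rw [mem_pvSSigs]
      refine ⟨⟨p, hp, h0, ?_⟩, hne⟩
      rw [mem_pvTrip]
      exact ⟨i, hl, rfl, rfl, he.symm⟩
    · rw [mem_pvHSigs]
      rw [isIn3_iff] at hin
      rcases hin with ⟨j, hj, h0', h1, h2⟩
      refine ⟨q, hq, hq0, ?_⟩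
      rw [mem_pvTrip]
      exact ⟨j, hj, h0', h1, h2⟩ -- triple (b, a, b) at q
  · rintro ⟨a, b, hab, hba⟩
    rw [mem_pvSSigs] at hab
    rcases hab with ⟨⟨p, hp, h0, hts⟩, hne⟩
    rw [mem_pvTrip] at hts
    rcases hts with ⟨i, hl, ha, hb, ha2⟩
    rw [mem_pvHSigs] at hba
    rcases hba with ⟨q, hq, hq0, htt⟩
    rw [mem_pvTrip] at htt
    rcases htt with ⟨j, hj, h0', h1, h2⟩
    refine ⟨p.2, ?_, i, hl, by rw [ha, ha2], by rw [ha, hb]; exact hne, q.2, ?_, ?_⟩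
    · rw [mem_pvSup]; exact ⟨p, hp, h0, rfl⟩
    · rw [mem_pvHyp]; exact ⟨q, hq, hq0, rfl⟩
    · rw [isIn3_iff]
      exact ⟨j, hj, h0'.trans hb.symm, h1.trans ha.symm, h2.trans hb.symm⟩

-- ===== VERDICT (by name: the statement is the Claim_ definition above) =====
theorem check_spec : Claim_equal_check := by
  intro ip _
  unfold Spec_check check check_alt
  rw [parse_eq]
  exact search_eq (pvSegs ip.toList)
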